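-- pv_equiv track=rewrite | github.com/coldbeeen/cote_study | programmers/롤케이크 자르기_chanbeen.py | solution
-- ===== SOURCE A (Python) =====
-- from collections import Counter
--
-- def solution(topping):
--     answer = 0
--
--     top_dict = Counter(topping)
--     new_dict = {}
--
--     for i in range(len(topping)):
--         elem = topping[i]
--
--         top_dict[elem] -= 1
--
--         if top_dict[elem] <= 0:
--             del top_dict[elem]
--
--         if elem in new_dict:
--             new_dict[elem] += 1
--         else:
--             new_dict[elem] = 1
--
--         if len(top_dict) == len(new_dict):
--             answer += 1
--
--     return answer
-- ===== SOURCE B (Python) =====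
-- def solution(topping):
--     # suffix pass: rights[i] = number of distinct toppings in topping[i:]
--     rights = [0]
--     seen = set()
--     for x in reversed(topping):
--         seen.add(x)
--         rights.append(len(seen))
--     rights.reverse()
--     # forward pass: compare prefix-distinct (including current) with suffix-distinct after it
--     answer = 0
--     seen = set()
--     for x, r in zip(topping, rights[1:]):
--         seen.add(x)
--         if len(seen) == r:
--             answer += 1
--     return answer
-- ===== Notes on version B (the rewrite author's own statement) =====
-- stated objective: faster
-- what changed: A interleaves one pass that shrinks a Counter of the remaining cake while growing a dict of the eaten part; B instead precomputes a suffix table of distinct-topping counts with a set and then does a separate forward scan with a second set, comparing against the table.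
import Mathlib
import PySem

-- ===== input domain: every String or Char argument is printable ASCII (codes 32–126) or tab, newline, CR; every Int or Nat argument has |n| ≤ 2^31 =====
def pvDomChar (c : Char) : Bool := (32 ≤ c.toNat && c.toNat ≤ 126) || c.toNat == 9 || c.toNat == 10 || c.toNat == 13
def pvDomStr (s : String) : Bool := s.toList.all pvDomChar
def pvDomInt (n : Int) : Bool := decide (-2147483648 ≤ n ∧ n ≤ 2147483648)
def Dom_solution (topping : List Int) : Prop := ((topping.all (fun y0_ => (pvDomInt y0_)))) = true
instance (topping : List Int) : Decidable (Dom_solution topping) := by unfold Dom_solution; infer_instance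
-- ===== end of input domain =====

-- B replaces A's single pass (shrinking a Counter of the remaining cake while growing a dict of
-- the eaten prefix) by a precomputed suffix table of distinct counts plus a separate forward scan.

-- ===== PORT A =====
-- loop body of A: decrement the Counter of the remaining part, delete exhausted keys,
-- count the current topping into new_dict, bump answer when the two dicts have equal size
def stepA (st : PySem.Dict Int Int × PySem.Dict Int Int × Int) (elem : Int) :
    PySem.Dict Int Int × PySem.Dict Int Int × Int :=
  let td := st.1.modify elem 0 (· - 1)
  let td2 := if td.getD elem 0 ≤ 0 then td.erase elem else td
  let nd := if st.2.1.contains elem then st.2.1.insert elem (st.2.1.getD elem 0 + 1)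
            else st.2.1.insert elem 1
  (td2, nd, if td2.size = nd.size then st.2.2 + 1 else st.2.2)

def solution (topping : List Int) : Int :=
  ((PySem.List.pyRange 0 (PySem.List.len topping)).foldl
      (fun st j => stepA st (PySem.List.pyGetD topping j 0))
      (PySem.Dict.counter topping, PySem.Dict.empty, (0 : Int))).2.2

-- ===== PORT B =====
-- first loop of B (over reversed(topping)): grow a set, append its size to rights
def bBuild (st : PySem.Set Int × List Int) (x : Int) : PySem.Set Int × List Int :=
  let s := PySem.Set.add st.1 x
  (s, st.2 ++ [(s.length : Int)])

-- second loop of B (over zip(topping, rights[1:])): grow a set, bump answer on size match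
def bScan (st : PySem.Set Int × Int) (p : Int × Int) : PySem.Set Int × Int :=
  let s := PySem.Set.add st.1 p.1
  (s, if (s.length : Int) = p.2 then st.2 + 1 else st.2)

def solution_alt (topping : List Int) : Int :=
  let rights := ((topping.reverse.foldl bBuild (PySem.Set.empty, [0])).2).reverse
  ((topping.zip (rights.drop 1)).foldl bScan (PySem.Set.empty, 0)).2

-- ===== PRECONDITION & SPEC =====
def Spec_solution (topping : List Int) (out : Int) : Prop := out = solution_alt topping
instance (topping : List Int) (out : Int) : Decidable (Spec_solution topping out) := by unfold Spec_solution; infer_instance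

-- ===== CLAIM (what is proved, stated in full; the proofs are below) =====
def Claim_equal_solution : Prop := ∀ (topping : List Int), Dom_solution topping → Spec_solution topping (solution topping)

-- ===== LEMMAS AND PROOFS =====

-- common reference count: walk the list keeping the finset of seen toppings, count the
-- positions where |seen incl. current| = |distinct toppings strictly after it|
def go : List Int → Finset Int → Int
  | [], _ => 0
  | x :: t, S => (if (insert x S).card = t.toFinset.card then 1 else 0) + go t (insert x S)

lemma len_eq_card (l : List Int) (S : Finset Int) (hnd : l.Nodup)
    (h : ∀ x, x ∈ l ↔ x ∈ S) : l.length = S.card := by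
  have : l.toFinset = S := Finset.ext (fun x => by simp [List.mem_toFinset, h])
  rw [← this, List.toFinset_card_of_nodup hnd]

-- facts about Dict.erase (the prelude has no erase lemmas)
lemma find?_filter_ne (l : List (Int × Int)) (k x : Int) (h : x ≠ k) :
    (l.filter (fun p => !(p.1 == k))).find? (fun p => p.1 == x) = l.find? (fun p => p.1 == x) := by
  induction l with
  | nil => simp
  | cons p t ih =>
    by_cases hp : p.1 = k
    · simp [hp, ih, (show (k == x) = false by simp; omega)]
    · by_cases hx : p.1 = x <;> simp [hp, hx, ih, h]

lemma erase_get?_of_ne (d : PySem.Dict Int Int) (k x : Int) (h : x ≠ k) :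
    (d.erase k).get? x = d.get? x := by
  simp [PySem.Dict.erase, PySem.Dict.get?, find?_filter_ne _ _ _ h]

lemma erase_get?_self (d : PySem.Dict Int Int) (k : Int) :
    (d.erase k).get? k = none := by
  simp only [PySem.Dict.erase, PySem.Dict.get?, Option.map_eq_none_iff, List.find?_eq_none,
    List.mem_filter]
  rintro p ⟨-, hk⟩
  simpa using hk

lemma erase_nodup (d : PySem.Dict Int Int) (k : Int) (h : d.keys.Nodup) :
    (d.erase k).keys.Nodup := by
  have hs : (d.erase k).items.Sublist d.items := List.filter_sublist
  have := (hs.map (fun p => p.1)).nodup (by simpa [PySem.Dict.keys] using h)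
  simpa [PySem.Dict.keys] using this

lemma erase_contains (d : PySem.Dict Int Int) (k x : Int) :
    (d.erase k).contains x = (decide (x ≠ k) && d.contains x) := by
  by_cases hx : x = k
  · subst hx
    simp only [PySem.Dict.contains, PySem.Dict.erase, ne_eq, not_true_eq_false, decide_false,
      Bool.false_and, List.any_eq_false, List.mem_filter]
    rintro p ⟨-, hk⟩
    simpa using hk
  · rw [PySem.Dict.contains_eq_isSome_get?, PySem.Dict.contains_eq_isSome_get?,
      erase_get?_of_ne d k x hx]
    simp [hx]

lemma size_eq_card (d : PySem.Dict Int Int) (S : Finset Int) (hnd : d.keys.Nodup)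
    (h : ∀ x, d.contains x = decide (x ∈ S)) : d.size = S.card := by
  have : d.size = d.keys.length := by simp [PySem.Dict.size, PySem.Dict.keys]
  rw [this]
  exact len_eq_card _ _ hnd (fun x => by
    rw [← PySem.Dict.contains_iff_mem_keys, h]; simp)

-- A's loop invariant: top_dict describes the remaining suffix, new_dict the seen finset
lemma A_loop (suf : List Int) : ∀ (dt dn : PySem.Dict Int Int) (ans : Int) (S : Finset Int),
    dt.keys.Nodup → (∀ x, dt.contains x = decide (x ∈ suf)) →
    (∀ x, dt.getD x 0 = suf.count x) →
    dn.keys.Nodup → (∀ x, dn.contains x = decide (x ∈ S)) →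
    (suf.foldl stepA (dt, dn, ans)).2.2 = ans + go suf S := by
  induction suf with
  | nil => intro dt dn ans S _ _ _ _ _; simp [go]
  | cons e rest ih =>
    intro dt dn ans S h1 h2 h3 h4 h5
    simp only [List.foldl_cons]
    set td := dt.modify e 0 (· - 1) with htd
    have hgetD_td : ∀ x, td.getD x 0 = (rest.count x : Int) := by
      intro x
      rw [htd, PySem.Dict.getD_modify]
      by_cases hx : x = e
      · subst hx; rw [h3]; simp
      · rw [if_neg hx, h3]; simp [Ne.symm hx]
    have hcont_td : ∀ x, td.contains x = (x == e || dt.contains x) := fun x =>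
      PySem.Dict.contains_modify dt e x 0 _
    have hnd_td : td.keys.Nodup := by
      rw [htd, PySem.Dict.modify]
      exact PySem.Dict.nodup_keys_insert _ _ _ h1
    have hnd_nd : (if dn.contains e then dn.insert e (dn.getD e 0 + 1) else dn.insert e 1).keys.Nodup := by
      split_ifs <;> exact PySem.Dict.nodup_keys_insert _ _ _ h4
    have hcont_nd : ∀ x, (if dn.contains e then dn.insert e (dn.getD e 0 + 1) else dn.insert e 1).contains x = decide (x ∈ insert e S) := by
      intro x
      split_ifs <;> rw [PySem.Dict.contains_insert, h5] <;> by_cases hx : x = e <;> simp [hx]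
    have hsize_nd : (if dn.contains e then dn.insert e (dn.getD e 0 + 1) else dn.insert e 1).size = (insert e S).card :=
      size_eq_card _ _ hnd_nd hcont_nd
    by_cases hz : td.getD e 0 ≤ 0
    · -- e exhausted: erased from top_dict
      have hzc : e ∉ rest := by
        have := hgetD_td e
        rw [this] at hz
        intro hm
        have := List.count_pos_iff.mpr hm
        omega
      have hnd_td2 : (td.erase e).keys.Nodup := erase_nodup _ _ hnd_td
      have hcont_td2 : ∀ x, (td.erase e).contains x = decide (x ∈ rest) := by
        intro x
        rw [erase_contains, hcont_td, h2]
        by_cases hx : x = e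
        · subst hx; simp [hzc]
        · simp [hx]
      have hgetD_td2 : ∀ x, (td.erase e).getD x 0 = (rest.count x : Int) := by
        intro x
        by_cases hx : x = e
        · subst hx
          rw [PySem.Dict.getD_eq_get?_getD, erase_get?_self]
          simp [List.count_eq_zero.mpr hzc]
        · rw [PySem.Dict.getD_eq_get?_getD, erase_get?_of_ne _ _ _ hx,
            ← PySem.Dict.getD_eq_get?_getD, hgetD_td]
      have hsize_td2 : (td.erase e).size = rest.toFinset.card :=
        size_eq_card _ _ hnd_td2 (fun x => by rw [hcont_td2]; simp)
      have hstep : stepA (dt, dn, ans) e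
          = (td.erase e,
             (if dn.contains e then dn.insert e (dn.getD e 0 + 1) else dn.insert e 1),
             if (td.erase e).size = (if dn.contains e then dn.insert e (dn.getD e 0 + 1) else dn.insert e 1).size then ans + 1 else ans) := by
        simp only [stepA, ← htd, if_pos hz]
      rw [hstep, ih _ _ _ (insert e S) hnd_td2 hcont_td2 hgetD_td2 hnd_nd hcont_nd]
      rw [hsize_td2, hsize_nd]
      show _ = ans + go (e :: rest) S
      rw [go]
      rcases eq_or_ne (insert e S).card rest.toFinset.card with hc | hc
      · rw [if_pos hc.symm, if_pos hc]; ring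
      · rw [if_neg (Ne.symm hc), if_neg hc]; ring
    · -- e still present in the remaining part
      have hzc : e ∈ rest := by
        have := hgetD_td e
        rw [this] at hz
        have : 0 < rest.count e := by omega
        exact List.count_pos_iff.mp this
      have hcont_td2 : ∀ x, td.contains x = decide (x ∈ rest) := by
        intro x
        rw [hcont_td, h2]
        by_cases hx : x = e
        · subst hx; simp [hzc]
        · simp [hx]
      have hsize_td2 : td.size = rest.toFinset.card :=
        size_eq_card _ _ hnd_td (fun x => by rw [hcont_td2]; simp)
      have hstep : stepA (dt, dn, ans) e
          = (td,
             (if dn.contains e then dn.insert e (dn.getD e 0 + 1) else dn.insert e 1),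
             if td.size = (if dn.contains e then dn.insert e (dn.getD e 0 + 1) else dn.insert e 1).size then ans + 1 else ans) := by
        simp only [stepA, ← htd, if_neg hz]
      rw [hstep, ih _ _ _ (insert e S) hnd_td hcont_td2 hgetD_td hnd_nd hcont_nd]
      rw [hsize_td2, hsize_nd]
      show _ = ans + go (e :: rest) S
      rw [go]
      rcases eq_or_ne (insert e S).card rest.toFinset.card with hc | hc
      · rw [if_pos hc.symm, if_pos hc]; ring
      · rw [if_neg (Ne.symm hc), if_neg hc]; ring

lemma solution_eq_go (topping : List Int) : solution topping = go topping ∅ := by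
  unfold solution
  rw [PySem.List.foldl_pyRange_pyGetD topping 0 stepA _ (le_refl 0)]
  simp only [Int.toNat_zero, List.drop_zero]
  rw [A_loop topping _ _ _ ∅ (PySem.Dict.nodup_keys_counter topping)
    (fun x => by rw [PySem.Dict.contains_counter]; simp)
    (fun x => PySem.Dict.getD_counter topping x)
    PySem.Dict.nodup_keys_empty
    (fun x => by simp [PySem.Dict.contains_empty])]
  ring

lemma add_len (seen : PySem.Set Int) (x : Int) (S : Finset Int)
    (hnd : seen.Nodup) (h : ∀ y, y ∈ seen ↔ y ∈ S) :
    (PySem.Set.add seen x).length = (insert x S).card :=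
  len_eq_card _ _ (PySem.Set.nodup_add seen x hnd)
    (fun y => by rw [PySem.Set.mem_add]; simp [h y, or_comm])

-- B's first loop produces the prefix-distinct counts of the traversed (reversed) list
lemma B_build (ys : List Int) : ∀ (seen : PySem.Set Int) (acc : List Int) (S : Finset Int),
    seen.Nodup → (∀ x, x ∈ seen ↔ x ∈ S) →
    (ys.foldl bBuild (seen, acc)).2
      = acc ++ (List.range ys.length).map
          (fun k => ((S ∪ (ys.take (k+1)).toFinset).card : Int)) := by
  induction ys with
  | nil => intro seen acc S _ _; simp
  | cons y t ih =>
    intro seen acc S hnd h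
    simp only [List.foldl_cons, bBuild]
    rw [ih (PySem.Set.add seen y) _ (insert y S) (PySem.Set.nodup_add seen y hnd)
      (fun x => by rw [PySem.Set.mem_add]; simp [h x, or_comm])]
    rw [add_len seen y S hnd h]
    rw [List.length_cons, List.range_succ_eq_map, List.map_cons, List.map_map]
    simp only [List.take_succ_cons, List.toFinset_cons, List.append_assoc, List.singleton_append]
    simp [Function.comp_def, Finset.insert_union, Finset.union_insert]

-- hence rights = the table of suffix distinct counts of topping
lemma rights_eq (topping : List Int) :
    ((topping.reverse.foldl bBuild (PySem.Set.empty, [0])).2).reverse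
      = (List.range (topping.length + 1)).map
          (fun i => (((topping.drop i).toFinset.card : Nat) : Int)) := by
  rw [B_build topping.reverse PySem.Set.empty [0] ∅ List.nodup_nil (fun x => by simp [PySem.Set.empty])]
  apply List.ext_getElem
  · simp
  · intro i h1 h2
    simp only [List.length_reverse, List.length_append, List.length_map, List.length_range,
      List.length_cons, List.length_nil] at h1 h2
    rw [List.getElem_reverse]
    rw [List.getElem_map (h := by simpa using h2)]
    simp only [List.length_append, List.length_map, List.length_range, List.length_cons,
      List.length_nil, List.getElem_range, List.length_reverse, Finset.empty_union]
    by_cases hi : i = topping.length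
    · subst hi
      simp
    · have hlt : i < topping.length := by omega
      rw [List.getElem_append_right (by simp; omega)]
      rw [List.getElem_map (h := by simp; omega)]
      rw [List.getElem_range]
      simp only [List.length_cons, List.length_nil]
      rw [show 1 + topping.length - 1 - i - 1 + 1 = topping.length - i from by omega]
      rw [List.take_reverse, List.toFinset_reverse]
      rw [show topping.length - (topping.length - i) = i from by omega]

-- B's second loop computes go
lemma B_scan (t : List Int) : ∀ (seen : PySem.Set Int) (ans : Int) (S : Finset Int),
    seen.Nodup → (∀ x, x ∈ seen ↔ x ∈ S) →
    ((t.zip ((List.range t.length).map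
        (fun i => (((t.drop (i+1)).toFinset.card : Nat) : Int)))).foldl bScan (seen, ans)).2
      = ans + go t S := by
  induction t with
  | nil => intro seen ans S _ _; simp [go]
  | cons x t ih =>
    intro seen ans S hnd h
    rw [List.length_cons, List.range_succ_eq_map, List.map_cons, List.map_map]
    simp only [List.drop_succ_cons, List.drop_zero, Function.comp_def, List.zip_cons_cons,
      List.foldl_cons]
    simp only [Nat.succ_eq_add_one, bScan]
    rw [ih (PySem.Set.add seen x) _ (insert x S) (PySem.Set.nodup_add seen x hnd)
      (fun y => by rw [PySem.Set.mem_add]; simp [h y, or_comm])]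
    rw [add_len seen x S hnd h]
    show _ = ans + go (x :: t) S
    rw [go]
    rcases eq_or_ne ((insert x S).card) (t.toFinset.card) with hc | hc
    · rw [if_pos (by exact_mod_cast hc), if_pos hc]; ring
    · rw [if_neg (by exact_mod_cast hc), if_neg hc]; ring

lemma solution_alt_eq_go (topping : List Int) : solution_alt topping = go topping ∅ := by
  unfold solution_alt
  simp only [rights_eq, List.range_succ_eq_map, List.map_cons, List.map_map, List.drop_one,
    List.tail_cons, Function.comp_def, Nat.succ_eq_add_one]
  rw [B_scan topping PySem.Set.empty 0 ∅ List.nodup_nil (fun x => by simp [PySem.Set.empty])]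
  ring

-- ===== VERDICT (by name: the statement is the Claim_ definition above) =====
theorem solution_spec : Claim_equal_solution := by
  intro topping _
  unfold Spec_solution
  rw [solution_eq_go, solution_alt_eq_go]
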